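-- pv_equiv track=rewrite | github.com/ncrout1/pythonLearning | April22.py | dupLastIndex
-- ===== SOURCE A (Python) =====
-- def dupLastIndex(arr):
--     # Complete the function
--     track=[-1,-1]
--     dict={}
--     for i,j in enumerate(arr):
--         if j in dict:
--             track[0]=i
--             track[1]=j
--         dict[j]=i
--     return track
-- ===== SOURCE B (Python) =====
-- def dupLastIndex(arr):
--     # First pass: map each value to its FIRST occurrence index.
--     first = {}
--     for i, v in enumerate(arr):
--         if v not in first:
--             first[v] = i
--     # Second pass: scan backward; the first i whose value occurred earlier wins.
--     for i in range(len(arr) - 1, -1, -1):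
--         if first[arr[i]] != i:
--             return [i, arr[i]]
--     return [-1, -1]
-- ===== Notes on version B (the rewrite author's own statement) =====
-- stated objective: alternative
-- what changed: Replaces A's single forward pass that overwrites a last-seen dict and accumulates the last hit with a first-occurrence dict built once plus a backward scan that early-exits at the first index whose value occurred earlier.
import Mathlib
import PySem

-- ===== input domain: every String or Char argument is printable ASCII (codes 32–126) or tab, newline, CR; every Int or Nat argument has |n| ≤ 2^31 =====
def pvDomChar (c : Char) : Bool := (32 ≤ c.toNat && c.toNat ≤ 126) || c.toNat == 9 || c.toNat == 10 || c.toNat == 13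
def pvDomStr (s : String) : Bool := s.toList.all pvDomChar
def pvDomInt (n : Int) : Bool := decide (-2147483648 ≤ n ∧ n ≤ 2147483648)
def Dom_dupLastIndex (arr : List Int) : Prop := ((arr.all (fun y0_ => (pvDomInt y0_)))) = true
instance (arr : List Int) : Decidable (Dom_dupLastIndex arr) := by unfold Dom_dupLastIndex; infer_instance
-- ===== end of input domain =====

-- B replaces A's forward last-seen-dict accumulation by a first-occurrence dict plus a
-- backward early-exit scan: a different decomposition, same O(n) cost.

-- ===== PORT A =====
-- one loop step of A: update track if j already a key, then dict[j] = i
def stepA (st : List Int × PySem.Dict Int Int) (p : Int × Int) :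
    List Int × PySem.Dict Int Int :=
  (if st.2.contains p.2 then [p.1, p.2] else st.1, st.2.insert p.2 p.1)

def dupLastIndex (arr : List Int) : List Int :=
  ((PySem.List.enumerate arr).foldl stepA ([-1, -1], PySem.Dict.empty)).1

-- ===== PORT B =====
-- first pass of B: record i only for values not yet keys
def firstStep (d : PySem.Dict Int Int) (p : Int × Int) : PySem.Dict Int Int :=
  if ¬ d.contains p.2 then d.insert p.2 p.1 else d

-- backward scan of B over (i, arr[i]) pairs, largest i first; 'first[arr[i]]' is ported as
-- getD with default 0 — every scanned value is a key of the first-occurrence dict, so the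
-- default is never consulted (Python would never hit a KeyError here).
def altScan (d : PySem.Dict Int Int) : List (Int × Int) → List Int
  | [] => [-1, -1]
  | p :: rest => if d.getD p.2 0 ≠ p.1 then [p.1, p.2] else altScan d rest

def dupLastIndex_alt (arr : List Int) : List Int :=
  let first := (PySem.List.enumerate arr).foldl firstStep PySem.Dict.empty
  altScan first (PySem.List.enumerate arr).reverse

-- ===== PRECONDITION & SPEC =====
def Spec_dupLastIndex (arr : List Int) (out : List Int) : Prop := out = dupLastIndex_alt arr
instance (arr : List Int) (out : List Int) : Decidable (Spec_dupLastIndex arr out) := by unfold Spec_dupLastIndex; infer_instance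

-- ===== CLAIM (what is proved, stated in full; the proofs are below) =====
def Claim_equal_dupLastIndex : Prop := ∀ (arr : List Int), Dom_dupLastIndex arr → Spec_dupLastIndex arr (dupLastIndex arr)

-- ===== LEMMAS AND PROOFS =====

-- A's dict component is an ordinary dict-only fold
theorem sndA (l : List (Int × Int)) (t : List Int) (d : PySem.Dict Int Int) :
    (l.foldl stepA (t, d)).2 = l.foldl (fun d p => d.insert p.2 p.1) d := by
  induction l generalizing t d with
  | nil => rfl
  | cons p l ih => simp [stepA, ih]

-- the first-occurrence fold looks up as: old binding, else first match in l
theorem firstFold_get? (l : List (Int × Int)) (d : PySem.Dict Int Int) (j : Int) :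
    (l.foldl firstStep d).get? j
      = ((d.get? j).or ((l.find? (fun p => p.2 == j)).map (·.1))) := by
  induction l generalizing d with
  | nil => simp
  | cons p l ih =>
    simp only [List.foldl_cons, firstStep]
    by_cases hc : d.contains p.2
    · simp only [hc, not_true, if_false, ih]
      by_cases hj : p.2 = j
      · subst hj
        have : ∃ v, d.get? p.2 = some v := by
          rcases h : d.get? p.2 with _ | v
          · rw [PySem.Dict.contains_eq_isSome_get?, h] at hc; simp at hc
          · exact ⟨v, rfl⟩
        rcases this with ⟨v, hv⟩
        simp [hv]
      · simp [hj]
    · simp only [hc, ih]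
      by_cases hj : p.2 = j
      · subst hj
        have hnone : d.get? p.2 = none := by
          rcases h : d.get? p.2 with _ | v
          · rfl
          · rw [PySem.Dict.contains_eq_isSome_get?, h] at hc; simp at hc
        simp [PySem.Dict.get?_insert_self, hnone]
      · simp [PySem.Dict.get?_insert_of_ne _ _ (Ne.symm hj), hj]

-- membership of j as a key of the first-occurrence dict of arr ↔ j ∈ arr
theorem firstFold_contains (arr : List Int) (j : Int) :
    ((PySem.List.enumerate arr).foldl firstStep PySem.Dict.empty).contains j
      = decide (j ∈ arr) := by
  rw [PySem.Dict.contains_eq_isSome_get?, firstFold_get?]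
  simp only [PySem.Dict.get?_empty, Option.or, Option.isSome_map]
  have hiff : ((PySem.List.enumerate arr).find? (fun p => p.2 == j)).isSome ↔ j ∈ arr := by
    rw [List.find?_isSome]
    constructor
    · rintro ⟨p, hm, hp⟩
      have h2 : p.2 ∈ (PySem.List.enumerate arr).map (fun q => q.2) :=
        List.mem_map_of_mem hm
      rw [PySem.List.map_snd_enumerate arr 0] at h2
      have : p.2 = j := by simpa using hp
      rwa [this] at h2
    · intro hj
      obtain ⟨k, hk, hget⟩ := List.getElem_of_mem hj
      exact ⟨((k : Int), arr[k]), (PySem.List.mem_enumerate_iff arr 0 _).mpr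
        ⟨k, hk, by simp⟩, by simp [hget]⟩
  by_cases hj : j ∈ arr
  · simp [hj, hiff.mpr hj]
  · simp only [hj, decide_false]
    rw [← Bool.not_eq_true]
    exact fun h => hj (hiff.mp h)

-- any stored first-occurrence index of an element of arr is < arr.length
theorem firstFold_getD_lt (arr : List Int) (j : Int) (hj : j ∈ arr) :
    ((PySem.List.enumerate arr).foldl firstStep PySem.Dict.empty).getD j 0
      < (arr.length : Int) := by
  have hc : ((PySem.List.enumerate arr).foldl firstStep PySem.Dict.empty).contains j = true := by
    rw [firstFold_contains]; simpa using hj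
  rw [PySem.Dict.contains_eq_isSome_get?] at hc
  rcases h : ((PySem.List.enumerate arr).foldl firstStep PySem.Dict.empty).get? j with _ | v
  · rw [h] at hc; simp at hc
  · rw [PySem.Dict.getD_of_get?_eq_some _ 0 h]
    rw [firstFold_get?] at h
    simp only [PySem.Dict.get?_empty, Option.or] at h
    rcases hf : (PySem.List.enumerate arr).find? (fun p => p.2 == j) with _ | p
    · rw [hf] at h; simp at h
    · rw [hf] at h
      simp only [Option.map_some] at h
      have hm := List.mem_of_find?_eq_some hf
      rcases (PySem.List.mem_enumerate_iff _ _ _).mp hm with ⟨k, hk, hpk⟩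
      have hv : v = p.1 := by simpa using h.symm
      have hp1 : p.1 = (k : Int) := by rw [hpk]; simp
      rw [hv, hp1]
      exact_mod_cast hk

-- altScan only consults the dict at values occurring in the scanned list
theorem altScan_congr (l : List (Int × Int)) (d d' : PySem.Dict Int Int)
    (h : ∀ p ∈ l, d.getD p.2 0 = d'.getD p.2 0) :
    altScan d l = altScan d' l := by
  induction l with
  | nil => rfl
  | cons p l ih =>
    simp only [altScan, h p (List.mem_cons_self ..)]
    split
    · rfl
    · exact ih (fun q hq => h q (List.mem_cons_of_mem _ hq))

theorem dupLastIndex_eq_alt (arr : List Int) : dupLastIndex arr = dupLastIndex_alt arr := by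
  induction arr using List.reverseRecOn with
  | nil => rfl
  | append_singleton xs x ih =>
    have hen : PySem.List.enumerate (xs ++ [x]) 0
        = PySem.List.enumerate xs 0 ++ [((xs.length : Int), x)] := by
      rw [PySem.List.enumerate_append]
      simp [PySem.List.enumerate_cons, PySem.List.enumerate_nil]
    by_cases hx : x ∈ xs
    · -- x occurred before: both return [len xs, x]
      have hA : dupLastIndex (xs ++ [x]) = [(xs.length : Int), x] := by
        unfold dupLastIndex
        rw [hen, List.foldl_append]
        simp only [List.foldl_cons, List.foldl_nil, stepA]
        have hkeys : ((PySem.List.enumerate xs 0).foldl stepA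
            (([-1, -1] : List Int), PySem.Dict.empty)).2.contains x = true := by
          rw [sndA]
          have := PySem.Dict.keys_foldl_insert_key (l := PySem.List.enumerate xs 0)
            (key := fun p => p.2) (f := fun d p => p.1) (d := PySem.Dict.empty)
          rw [PySem.Dict.contains_iff_mem_keys]
          rw [show (fun (d : PySem.Dict Int Int) (p : Int × Int) => d.insert p.2 p.1)
              = (fun d p => d.insert ((fun q => q.2) p) ((fun (d : PySem.Dict Int Int) (q : Int × Int) => q.1) d p)) from rfl]
          rw [this]
          rw [show ((PySem.List.enumerate xs 0).map fun p => p.2) = xs from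
            PySem.List.map_snd_enumerate xs 0]
          simp [PySem.Dict.keys_empty, PySem.Set.mem_update, hx]
        simp [hkeys]
      have hB : dupLastIndex_alt (xs ++ [x]) = [(xs.length : Int), x] := by
        unfold dupLastIndex_alt
        rw [hen, List.foldl_append]
        simp only [List.foldl_cons, List.foldl_nil, firstStep]
        have hc : ((PySem.List.enumerate xs 0).foldl firstStep PySem.Dict.empty).contains x
            = true := by rw [firstFold_contains]; simpa using hx
        rw [if_neg (by simp [hc])]
        rw [List.reverse_append]
        simp only [List.reverse_cons, List.reverse_nil, List.nil_append, List.cons_append, altScan]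
        rw [if_pos]
        have := firstFold_getD_lt xs x hx
        omega
      rw [hA, hB]
    · -- x is new: the last pair changes nothing, reduce to ih
      have hA : dupLastIndex (xs ++ [x]) = dupLastIndex xs := by
        unfold dupLastIndex
        rw [hen, List.foldl_append]
        simp only [List.foldl_cons, List.foldl_nil, stepA]
        have hkeys : ((PySem.List.enumerate xs 0).foldl stepA
            (([-1, -1] : List Int), PySem.Dict.empty)).2.contains x = false := by
          rw [sndA]
          have := PySem.Dict.keys_foldl_insert_key (l := PySem.List.enumerate xs 0)
            (key := fun p => p.2) (f := fun d p => p.1) (d := PySem.Dict.empty)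
          rw [show (fun (d : PySem.Dict Int Int) (p : Int × Int) => d.insert p.2 p.1)
              = (fun d p => d.insert ((fun q => q.2) p) ((fun (d : PySem.Dict Int Int) (q : Int × Int) => q.1) d p)) from rfl]
          rw [← Bool.not_eq_true]
          rw [PySem.Dict.contains_iff_mem_keys, this]
          rw [show ((PySem.List.enumerate xs 0).map fun p => p.2) = xs from
            PySem.List.map_snd_enumerate xs 0]
          simp [PySem.Dict.keys_empty, PySem.Set.mem_update, hx]
        simp [hkeys]
      have hB : dupLastIndex_alt (xs ++ [x]) = dupLastIndex_alt xs := by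
        unfold dupLastIndex_alt
        rw [hen, List.foldl_append]
        simp only [List.foldl_cons, List.foldl_nil, firstStep]
        have hc : ((PySem.List.enumerate xs 0).foldl firstStep PySem.Dict.empty).contains x
            = false := by
          rw [firstFold_contains]; simpa using hx
        rw [if_pos (by simp [hc])]
        rw [List.reverse_append]
        simp only [List.reverse_cons, List.reverse_nil, List.nil_append, List.cons_append, altScan]
        rw [if_neg (by simp [PySem.Dict.getD_insert_self])]
        apply altScan_congr
        intro p hp
        have hpx : p.2 ≠ x := by
          have hm : p ∈ PySem.List.enumerate xs 0 := List.mem_reverse.mp hp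
          have : p.2 ∈ (PySem.List.enumerate xs 0).map (·.2) := List.mem_map_of_mem hm
          rw [PySem.List.map_snd_enumerate] at this
          intro h; rw [h] at this; exact hx this
        rw [PySem.Dict.getD_insert_of_ne _ _ _ hpx]
      rw [hA, hB, ih]

-- ===== VERDICT (by name: the statement is the Claim_ definition above) =====
theorem dupLastIndex_spec : Claim_equal_dupLastIndex := by
  intro arr _
  unfold Spec_dupLastIndex
  exact dupLastIndex_eq_alt arr
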